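-- pv_equiv track=rewrite | github.com/fengli1702/streamvedio | workspace/vllm/run_target_streaming_only.py | build_prompts_streaming
-- ===== SOURCE A (Python) =====
-- from typing import List, Sequence
--
-- def build_prompts_streaming(
--     frame_tokens: Sequence[list[int]],
--     context_length: int,
--     batch_size: int,
--     num_prompts: int,
-- ) -> list[list[int]]:
--     """
--     按照 tream.InferenceActor 的逻辑构造“流式” prompt：
--     - 逐帧积累，当帧数达到 batch_size 的倍数时，
--       对最近 batch_size 帧构造 prompts，
--       每条 prompt 由前 context_length 帧的 token 拼接。
--     - 返回拍平成一维 list[list[int]]，方便依次送入 LLMEngine。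
--     """
--     if num_prompts % batch_size != 0:
--         raise ValueError("--num-prompts 必须是 --inference-batch-size 的整数倍")
--
--     token_buffer: list[list[int]] = []
--     prompt_batches: list[list[list[int]]] = []
--     total_prompts = 0
--
--     for idx, frame_token in enumerate(frame_tokens):
--         token_buffer.append(frame_token)
--
--         if (idx + 1) % batch_size != 0:
--             continue
--
--         buffer_length = len(token_buffer)
--         start_idx = buffer_length - batch_size + 1
--         batch_prompts: list[list[int]] = []
--         for i in range(start_idx, buffer_length + 1):
--             ctx_start = max(0, i - context_length)
--             prompt_frames = token_buffer[ctx_start:i]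
--             prompt_tokens: list[int] = []
--             for ft in prompt_frames:
--                 prompt_tokens.extend(ft)
--             batch_prompts.append(prompt_tokens)
--         prompt_batches.append(batch_prompts)
--         total_prompts += len(batch_prompts)
--         if total_prompts >= num_prompts:
--             overflow = total_prompts - num_prompts
--             if overflow > 0:
--                 prompt_batches[-1] = prompt_batches[-1][:-overflow]
--             break
--
--     flat_prompts: list[list[int]] = []
--     for batch in prompt_batches:
--         flat_prompts.extend(batch)
--
--     if len(flat_prompts) != num_prompts:
--         raise ValueError(f"仅构造出 {len(flat_prompts)} 条提示，少于期望 {num_prompts}")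
--     return flat_prompts
-- ===== SOURCE B (Python) =====
-- def build_prompts_streaming(
--     frame_tokens,
--     context_length,
--     batch_size,
--     num_prompts,
-- ):
--     # Prompt k (k = 1..num_prompts) is just the concatenation of the frames
--     # in the sliding window frame_tokens[max(0, k - context_length):k];
--     # the batching in A is incidental to the returned value.
--     if num_prompts % batch_size != 0:
--         raise ValueError("--num-prompts 必须是 --inference-batch-size 的整数倍")
--     if num_prompts < 0 or len(frame_tokens) < num_prompts:
--         raise ValueError(f"仅构造出 0 条提示，少于期望 {num_prompts}")
--     return [
--         sum(frame_tokens[max(0, k - context_length):k], [])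
--         for k in range(1, num_prompts + 1)
--     ]
-- ===== Notes on version B (the rewrite author's own statement) =====
-- stated objective: simpler
-- what changed: Replaces A's batch accumulation (token buffer, per-batch prompt lists, overflow trimming, final flatten) with a single comprehension: prompt k is the concatenation of the sliding window frame_tokens[max(0,k-context_length):k] for k=1..num_prompts.
import Mathlib
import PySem

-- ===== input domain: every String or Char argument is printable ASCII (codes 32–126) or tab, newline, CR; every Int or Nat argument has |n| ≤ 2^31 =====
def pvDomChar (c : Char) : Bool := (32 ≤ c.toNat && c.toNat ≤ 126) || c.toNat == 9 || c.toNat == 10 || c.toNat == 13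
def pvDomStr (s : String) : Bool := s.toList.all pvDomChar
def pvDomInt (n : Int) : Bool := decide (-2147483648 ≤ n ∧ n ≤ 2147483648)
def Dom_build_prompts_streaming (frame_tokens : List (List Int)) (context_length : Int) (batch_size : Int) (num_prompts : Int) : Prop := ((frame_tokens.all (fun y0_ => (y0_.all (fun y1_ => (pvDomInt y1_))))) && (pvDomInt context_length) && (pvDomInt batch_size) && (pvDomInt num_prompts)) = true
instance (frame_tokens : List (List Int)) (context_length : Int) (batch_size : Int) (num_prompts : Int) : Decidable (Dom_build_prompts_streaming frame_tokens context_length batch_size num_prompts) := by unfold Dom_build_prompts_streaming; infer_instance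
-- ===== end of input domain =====

-- B replaces A's batch accumulation (token buffer, per-batch lists, overflow trimming, final
-- flatten) with one comprehension over k = 1..num_prompts of the sliding window
-- frame_tokens[max(0, k-context_length):k]; same values, simpler decomposition.

-- ===== PORT A =====
-- A's main loop over enumerate(frame_tokens); state: token_buffer, prompt_batches, total_prompts.
-- The two `raise` statements of A return no value and are excluded by Pre_ below.
def pvLoopA (ctx bs np : Int) :
    List (List Int) → Int → List (List Int) → List (List (List Int)) → Int → List (List (List Int))
  | [], _, _, batches, _ => batches
  | f :: rest, idx, buf, batches, total =>
    let buf := buf ++ [f]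
    if PySem.Int.mod (idx + 1) bs ≠ 0 then
      pvLoopA ctx bs np rest (idx + 1) buf batches total
    else
      let bl : Int := buf.length
      let start_idx := bl - bs + 1
      let batch_prompts := (PySem.List.pyRange start_idx (bl + 1) 1).map
        (fun i =>
          (PySem.List.slice buf (some (max 0 (i - ctx))) (some i)).foldl
            (fun acc ft => acc ++ ft) [])
      let batches := batches ++ [batch_prompts]
      let total := total + (batch_prompts.length : Int)
      if np ≤ total then
        let overflow := total - np
        if 0 < overflow then
          -- prompt_batches[-1] = prompt_batches[-1][:-overflow]  (batch_prompts IS prompt_batches[-1])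
          batches.dropLast ++ [PySem.List.slice batch_prompts none (some (-overflow))]
        else batches
      else
        pvLoopA ctx bs np rest (idx + 1) buf batches total

def build_prompts_streaming (frame_tokens : List (List Int)) (context_length : Int) (batch_size : Int) (num_prompts : Int) : List (List Int) :=
  (pvLoopA context_length batch_size num_prompts frame_tokens 0 [] [] 0).foldl
    (fun acc batch => acc ++ batch) []

-- ===== PORT B =====
def build_prompts_streaming_alt (frame_tokens : List (List Int)) (context_length : Int) (batch_size : Int) (num_prompts : Int) : List (List Int) :=
  (PySem.List.pyRange 1 (num_prompts + 1) 1).map (fun k =>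
    (PySem.List.slice frame_tokens (some (max 0 (k - context_length))) (some k)).foldl
      (fun acc ft => acc ++ ft) [])

-- ===== PRECONDITION & SPEC =====
-- Pre_ is exactly the set of inputs on which A returns normally: A raises ZeroDivisionError for
-- batch_size = 0, ValueError when num_prompts % batch_size != 0, and ValueError ("too few
-- prompts") whenever num_prompts > 0 and either batch_size < 0 or len(frame_tokens) < num_prompts.
def Pre_build_prompts_streaming (frame_tokens : List (List Int)) (context_length : Int) (batch_size : Int) (num_prompts : Int) : Prop :=
  batch_size ≠ 0 ∧ PySem.Int.mod num_prompts batch_size = 0 ∧ 0 ≤ num_prompts ∧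
    (num_prompts = 0 ∨ (0 < batch_size ∧ num_prompts ≤ (frame_tokens.length : Int)))
instance (frame_tokens : List (List Int)) (context_length : Int) (batch_size : Int) (num_prompts : Int) : Decidable (Pre_build_prompts_streaming frame_tokens context_length batch_size num_prompts) := by unfold Pre_build_prompts_streaming; infer_instance

def pvWitness_build_prompts_streaming : List (List Int) × Int × Int × Int :=
  ([[1, 2], [3], [4, 5]], 2, 1, 2)

def Spec_build_prompts_streaming (frame_tokens : List (List Int)) (context_length : Int) (batch_size : Int) (num_prompts : Int) (out : List (List Int)) : Prop := out = build_prompts_streaming_alt frame_tokens context_length batch_size num_prompts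
instance (frame_tokens : List (List Int)) (context_length : Int) (batch_size : Int) (num_prompts : Int) (out : List (List Int)) : Decidable (Spec_build_prompts_streaming frame_tokens context_length batch_size num_prompts out) := by unfold Spec_build_prompts_streaming; infer_instance

-- ===== CLAIM (what is proved, stated in full; the proofs are below) =====
def Claim_equal_build_prompts_streaming : Prop := ∀ (frame_tokens : List (List Int)) (context_length : Int) (batch_size : Int) (num_prompts : Int), Dom_build_prompts_streaming frame_tokens context_length batch_size num_prompts → Pre_build_prompts_streaming frame_tokens context_length batch_size num_prompts → Spec_build_prompts_streaming frame_tokens context_length batch_size num_prompts (build_prompts_streaming frame_tokens context_length batch_size num_prompts)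

-- ===== LEMMAS AND PROOFS =====

-- prompt k over the full frame list (the common value both ports build)
def pvPrompt (F : List (List Int)) (ctx k : Int) : List Int :=
  (PySem.List.slice F (some (max 0 (k - ctx))) (some k)).foldl (fun acc ft => acc ++ ft) []

lemma pvSlicePrefix {a} (xs ys : List a) (lo hi : Int) (h0 : 0 ≤ lo) (h1 : 0 ≤ hi)
    (h2 : hi ≤ (xs.length : Int)) :
    PySem.List.slice (xs ++ ys) (some lo) (some hi) = PySem.List.slice xs (some lo) (some hi) := by
  rw [PySem.List.slice_toNat _ h0 h1, PySem.List.slice_toNat _ h0 h1]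
  have hhi : hi.toNat ≤ xs.length := by omega
  have hlo : lo.toNat ≤ xs.length ∨ hi.toNat - lo.toNat = 0 := by omega
  rcases hlo with hlo | hlo
  · rw [List.drop_append_of_le_length hlo,
      List.take_append_of_le_length (by simp [List.length_drop]; omega)]
  · simp [hlo]

lemma pvFoldlFlat (Bs : List (List (List Int))) (init : List (List Int)) :
    Bs.foldl (fun acc batch => acc ++ batch) init = init ++ Bs.flatten := by
  induction Bs generalizing init with
  | nil => simp
  | cons b bs ih => simp [ih]

lemma pvLoopA_zero_neg (ctx bs : Int) (hbs : bs < 0) :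
    ∀ (rest buf : List (List Int)) (Bs : List (List (List Int))) (idx : Int),
      (pvLoopA ctx bs 0 rest idx buf Bs 0).flatten = Bs.flatten := by
  intro rest
  induction rest with
  | nil => intro buf Bs idx; simp [pvLoopA]
  | cons f rest ih =>
    intro buf Bs idx
    rw [pvLoopA]
    by_cases hmod : PySem.Int.mod (idx + 1) bs = 0
    · have hempty : PySem.List.pyRange ((buf.length : Int) + 1 - bs + 1)
          ((buf.length : Int) + 1 + 1) 1 = [] :=
        PySem.List.pyRange_one_eq_nil (by omega)
      simp [hmod, hempty]
    · simp only [if_pos (by simpa using hmod)]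
      exact ih (buf ++ [f]) Bs (idx + 1)

lemma pvLoopA_spec (ctx bs np : Int) (hbs : 0 < bs) (hdvd : bs ∣ np) :
    ∀ (rest buf : List (List Int)) (Bs : List (List (List Int))) (t idx : Int),
      idx = (buf.length : Int) → bs ∣ t → 0 ≤ t → t ≤ idx → idx < t + bs → t ≤ np →
      np ≤ (buf.length : Int) + (rest.length : Int) →
      Bs.flatten = (PySem.List.pyRange 1 (t + 1) 1).map (pvPrompt (buf ++ rest) ctx) →
      (pvLoopA ctx bs np rest idx buf Bs t).flatten =
        (PySem.List.pyRange 1 (np + 1) 1).map (pvPrompt (buf ++ rest) ctx) := by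
  intro rest
  induction rest with
  | nil =>
    intro buf Bs t idx hidx hdt ht0 hti hib htnp hlen hflat
    have htp : t = np := by
      rcases eq_or_lt_of_le htnp with h | h
      · exact h
      · have := Int.le_of_dvd (by omega) (dvd_sub hdvd hdt)
        simp at hlen
        omega
    subst htp
    simpa [pvLoopA] using hflat
  | cons f rest ih =>
    intro buf Bs t idx hidx hdt ht0 hti hib htnp hlen hflat
    rw [pvLoopA]
    have hF : buf ++ f :: rest = buf ++ [f] ++ rest := by simp
    by_cases hmod : PySem.Int.mod (idx + 1) bs = 0
    · have hdix : bs ∣ (idx + 1) := (PySem.Int.mod_eq_zero_iff_dvd _ _).mp hmod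
      have hidx1 : idx + 1 = t + bs := by
        have h2 : bs ≤ idx + 1 - t := Int.le_of_dvd (by omega) (dvd_sub hdix hdt)
        omega
      rw [if_neg (by simp [hmod])]
      dsimp only
      have hbl : ((buf ++ [f]).length : Int) = t + bs := by
        simp only [List.length_append, List.length_cons, List.length_nil]
        push_cast
        omega
      rw [hbl]
      have hmapeq : (PySem.List.pyRange (t + bs - bs + 1) (t + bs + 1) 1).map
          (fun i => (PySem.List.slice (buf ++ [f]) (some (max 0 (i - ctx))) (some i)).foldl
            (fun acc ft => acc ++ ft) [])
          = (PySem.List.pyRange (t + 1) (t + bs + 1) 1).map (pvPrompt (buf ++ f :: rest) ctx) := by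
        rw [show t + bs - bs + 1 = t + 1 from by ring]
        apply List.map_congr_left
        intro i hi
        obtain ⟨hi1, hi2⟩ := PySem.List.mem_pyRange_one.mp hi
        unfold pvPrompt
        rw [hF, pvSlicePrefix (buf ++ [f]) rest _ _ (le_max_left 0 _) (by omega)
          (by rw [hbl]; omega)]
      rw [hmapeq]
      have hBPlen : (((PySem.List.pyRange (t + 1) (t + bs + 1) 1).map
          (pvPrompt (buf ++ f :: rest) ctx)).length : Int) = bs := by
        simp [PySem.List.length_pyRange_one]
        omega
      rw [hBPlen]
      by_cases hbreak : np ≤ t + bs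
      · rw [if_pos hbreak]
        by_cases hov : 0 < t + bs - np
        · rw [if_pos hov, List.dropLast_concat]
          have hsplit : PySem.List.pyRange (t + 1) (t + bs + 1) 1 =
              PySem.List.pyRange (t + 1) (np + 1) 1 ++ PySem.List.pyRange (np + 1) (t + bs + 1) 1 :=
            PySem.List.pyRange_one_append _ _ _ (by omega) (by omega)
          have hovn : -(t + bs - np) = -(((t + bs - np).toNat : Int)) := by omega
          rw [hovn, PySem.List.slice_to_neg_natCast _ _ (by omega)]
          have hk : ((PySem.List.pyRange (t + 1) (t + bs + 1) 1).map
                (pvPrompt (buf ++ f :: rest) ctx)).length - (t + bs - np).toNat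
              = ((PySem.List.pyRange (t + 1) (np + 1) 1).map
                (pvPrompt (buf ++ f :: rest) ctx)).length := by
            simp [PySem.List.length_pyRange_one]
            omega
          rw [hk, hsplit, List.map_append, List.take_left]
          rw [List.flatten_append, hflat,
            PySem.List.pyRange_one_append 1 (t + 1) (np + 1) (by omega) (by omega),
            List.map_append]
          simp
        · rw [if_neg hov]
          have hnpeq : np = t + bs := by omega
          rw [List.flatten_append, hflat,
            PySem.List.pyRange_one_append 1 (t + 1) (np + 1) (by omega) (by omega),
            List.map_append]
          simp [hnpeq]
      · rw [if_neg hbreak]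
        have hlen' : np ≤ ((buf ++ [f]).length : Int) + (rest.length : Int) := by
          simp only [List.length_cons] at hlen
          rw [hbl]; push_cast at hlen; omega
        have := ih (buf ++ [f]) (Bs ++ [(PySem.List.pyRange (t + 1) (t + bs + 1) 1).map
            (pvPrompt (buf ++ f :: rest) ctx)]) (t + bs) (idx + 1)
          (by rw [hbl]; omega) (Dvd.dvd.add hdt dvd_rfl) (by omega) (by omega) (by omega)
          (by omega) hlen'
          (by
            rw [← hF, List.flatten_append, hflat,
              PySem.List.pyRange_one_append 1 (t + 1) (t + bs + 1) (by omega) (by omega),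
              List.map_append]
            simp)
        rw [← hF] at this
        exact this
    · rw [if_pos (by simpa using hmod)]
      have hne : idx + 1 ≠ t + bs := fun h => hmod (by
        rw [h]; exact (PySem.Int.mod_eq_zero_iff_dvd _ _).mpr (Dvd.dvd.add hdt dvd_rfl))
      have hidx' : idx + 1 = ((buf ++ [f]).length : Int) := by
        simp only [List.length_append, List.length_cons, List.length_nil]
        push_cast; omega
      have hlen' : np ≤ ((buf ++ [f]).length : Int) + (rest.length : Int) := by
        simp only [List.length_cons] at hlen
        rw [← hidx']; push_cast at hlen; omega
      have := ih (buf ++ [f]) Bs t (idx + 1) hidx' hdt ht0 (by omega) (by omega) htnp hlen'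
        (by rw [← hF]; exact hflat)
      rw [← hF] at this
      exact this

-- ===== VERDICT (by name: the statement is the Claim_ definition above) =====
theorem build_prompts_streaming_spec : Claim_equal_build_prompts_streaming := by
  intro F ctx bs np _ hpre
  obtain ⟨hbs0, hmod, hnp0, hcase⟩ := hpre
  show _ = _
  unfold build_prompts_streaming build_prompts_streaming_alt
  rcases hcase with hz | ⟨hbs, hn⟩
  · subst hz
    rcases lt_or_gt_of_ne hbs0 with hneg | hpos
    · rw [pvFoldlFlat, pvLoopA_zero_neg ctx bs hneg]
      simp
    · rw [pvFoldlFlat]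
      rw [pvLoopA_spec ctx bs 0 hpos ((PySem.Int.mod_eq_zero_iff_dvd _ _).mp hmod)
          F [] [] 0 0 rfl ⟨0, by ring⟩ le_rfl le_rfl (by omega) le_rfl (by simp) (by simp)]
      simp
  · rw [pvFoldlFlat]
    rw [pvLoopA_spec ctx bs np hbs ((PySem.Int.mod_eq_zero_iff_dvd _ _).mp hmod)
        F [] [] 0 0 rfl ⟨0, by ring⟩ le_rfl le_rfl (by omega) hnp0 (by simpa using hn) (by simp)]
    simp [pvPrompt]
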